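-- pv_equiv track=rewrite | github.com/TheeDefault/Hindi-Wordplay | Parameters.py | check_alliteration
-- ===== SOURCE A (Python) =====
-- from collections import defaultdict, Counter
--
-- def check_alliteration(poem, n):
--     def find_alliteration(line, n):
--         # Split the line into words
--         words = line.strip().split()
--         alliteration_groups = []
--
--         # Dictionary to track words by their first n characters
--         groups = defaultdict(list)
--
--         # Loop through words and classify them by their first n characters
--         for word in words:
--             start = word[:n].lower()  # Extract the first n characters and make lowercase
--             groups[start].append(word)
--
--         # Collect the groups with more than 1 word (alliteration)
--         for group in groups.values():
--             if len(group) > 1: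
--                 alliteration_groups.append(len(group))
--
--         # Return the alliteration groups in the form of a tuple
--         return tuple(sorted(alliteration_groups))
--
--     # Split the poem into lines
--     lines = poem.strip().split("\n")
--
--     # Apply the alliteration check to each line
--     alliteration_results = [find_alliteration(line, n) for line in lines]
--
--     return alliteration_results
-- ===== SOURCE B (Python) =====
-- def check_alliteration(poem, n):
--     def find_alliteration(line, n):
--         # sort-then-scan grouping: sort the prefix keys, count consecutive runs
--         keys = sorted(word[:n].lower() for word in line.strip().split())
--         sizes = []
--         prev = None
--         run = 0
--         for k in keys:
--             if k == prev:
--                 run += 1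
--             else:
--                 if run > 1:
--                     sizes.append(run)
--                 prev = k
--                 run = 1
--         if run > 1:
--             sizes.append(run)
--         return tuple(sorted(sizes))
--
--     return [find_alliteration(line, n) for line in poem.strip().split("\n")]
-- ===== Notes on version B (the rewrite author's own statement) =====
-- stated objective: alternative
-- what changed: Per line, instead of building a dict of word groups keyed by word[:n].lower() and collecting group sizes, B sorts the keys and counts consecutive runs in a single prev/run scan, emitting run lengths > 1.
import Mathlib
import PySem

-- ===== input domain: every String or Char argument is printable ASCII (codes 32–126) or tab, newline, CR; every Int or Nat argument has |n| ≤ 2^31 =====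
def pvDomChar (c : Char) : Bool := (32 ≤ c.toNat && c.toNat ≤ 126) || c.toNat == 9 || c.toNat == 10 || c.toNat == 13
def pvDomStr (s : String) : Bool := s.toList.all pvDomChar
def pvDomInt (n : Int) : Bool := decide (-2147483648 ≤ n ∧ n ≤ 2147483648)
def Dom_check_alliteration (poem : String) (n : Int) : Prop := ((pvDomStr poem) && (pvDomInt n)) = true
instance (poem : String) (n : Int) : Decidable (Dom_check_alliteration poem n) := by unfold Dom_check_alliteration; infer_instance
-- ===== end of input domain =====

-- B replaces A's dict-of-groups pass by sorting the prefix keys and counting consecutive runs in one scan (alternative decomposition).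

-- ===== PORT A =====
-- find_alliteration: group words by word[:n].lower() in a dict, collect group sizes > 1, return them sorted
def check_alliteration_findA (line : String) (n : Int) : List Int :=
  let words := PySem.Str.split₀ (PySem.Str.strip line)
  let groups : PySem.Dict String (List String) :=
    words.foldl (fun d w =>
      d.modify (PySem.Str.lower (PySem.Str.slice w none (some n))) [] (fun g => g ++ [w]))
      PySem.Dict.empty
  let alliteration_groups : List Int :=
    groups.values.foldl (fun acc g =>
      if 1 < PySem.List.len g then acc ++ [PySem.List.len g] else acc) []
  PySem.List.sorted alliteration_groups (fun x => x) false

def check_alliteration (poem : String) (n : Int) : List (List Int) :=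
  let lines := (PySem.Str.split? (PySem.Str.strip poem) "\n").getD []
  lines.map (fun line => check_alliteration_findA line n)

-- ===== PORT B =====
-- find_alliteration: sort the keys word[:n].lower(), then one scan (prev/run) emits each run length > 1
def check_alliteration_findB (line : String) (n : Int) : List Int :=
  let keys := PySem.List.sorted
    ((PySem.Str.split₀ (PySem.Str.strip line)).map
      (fun w => PySem.Str.lower (PySem.Str.slice w none (some n))))
    (fun k => k) false
  let st := keys.foldl
    (fun (st : List Int × Option String × Int) k =>
      if some k = st.2.1 then (st.1, st.2.1, st.2.2 + 1)
      else ((if 1 < st.2.2 then st.1 ++ [st.2.2] else st.1), some k, 1))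
    ([], none, 0)
  let sizes := if 1 < st.2.2 then st.1 ++ [st.2.2] else st.1
  PySem.List.sorted sizes (fun x => x) false

def check_alliteration_alt (poem : String) (n : Int) : List (List Int) :=
  ((PySem.Str.split? (PySem.Str.strip poem) "\n").getD []).map
    (fun line => check_alliteration_findB line n)

-- ===== PRECONDITION & SPEC =====
def Spec_check_alliteration (poem : String) (n : Int) (out : List (List Int)) : Prop := out = check_alliteration_alt poem n
instance (poem : String) (n : Int) (out : List (List Int)) : Decidable (Spec_check_alliteration poem n out) := by unfold Spec_check_alliteration; infer_instance

-- ===== CLAIM (what is proved, stated in full; the proofs are below) =====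
def Claim_equal_check_alliteration : Prop := ∀ (poem : String) (n : Int), Dom_check_alliteration poem n → Spec_check_alliteration poem n (check_alliteration poem n)

-- ===== LEMMAS AND PROOFS =====

-- the common closed form: for the list of keys km, the sizes (> 1) of the groups
-- of equal keys, one per distinct key in first-occurrence order
def pvCform (km : List String) : List Int :=
  ((PySem.Set.ofList km).filter (fun c => decide (1 < km.count c))).map (fun c => (km.count c : Int))

def pvEmit (r : Int) : List Int := if 1 < r then [r] else []

-- closed form of B's prev/run scan: a pending run of `run` copies of `p`, then the rest of the keys
def pvRunsFrom (p : String) (run : Int) : List String → List Int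
  | [] => pvEmit run
  | x :: s => if x = p then pvRunsFrom p (run + 1) s else pvEmit run ++ pvRunsFrom x 1 s

-- B's fold step and finalizer, as named functions (definitionally the lambdas of the port)
def pvStep (st : List Int × Option String × Int) (k : String) : List Int × Option String × Int :=
  if some k = st.2.1 then (st.1, st.2.1, st.2.2 + 1)
  else ((if 1 < st.2.2 then st.1 ++ [st.2.2] else st.1), some k, 1)

def pvFin (st : List Int × Option String × Int) : List Int :=
  if 1 < st.2.2 then st.1 ++ [st.2.2] else st.1

-- ---- A side: the dict loop produces exactly the closed form ----

lemma lenGroup (words : List String) (key : String → String) (c : String) :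
    ((words.foldl (fun d w => d.modify (key w) [] (fun g => g ++ [w]))
      (PySem.Dict.empty : PySem.Dict String (List String))).getD c []).length
    = (words.map key).count c := by
  have h1 : words.foldl (fun d w => d.modify (key w) [] (fun g => g ++ [w]))
      (PySem.Dict.empty : PySem.Dict String (List String))
      = (words.map (fun w => (key w, w))).foldl (fun d p => d.modify p.1 [] (fun g => g ++ [p.2]))
        PySem.Dict.empty := by
    rw [List.foldl_map]
  rw [h1, PySem.Dict.getD_foldl_modify_append]
  simp only [PySem.Dict.getD_empty, List.nil_append, List.length_map]
  rw [← List.countP_eq_length_filter, List.count, List.countP_map, List.countP_map]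
  rfl

lemma keysGroup (words : List String) (key : String → String) :
    (words.foldl (fun d w => d.modify (key w) [] (fun g => g ++ [w]))
      (PySem.Dict.empty : PySem.Dict String (List String))).keys
    = PySem.Set.ofList (words.map key) := by
  have h := PySem.Dict.keys_foldl_modify_key words key ([] : List String)
      (fun _ w => (fun g => g ++ [w])) PySem.Dict.empty
  simpa [PySem.Set.update_nil_left] using h

lemma A_unsorted (words : List String) (key : String → String) :
    ((words.foldl (fun d w => d.modify (key w) [] (fun g => g ++ [w]))
        (PySem.Dict.empty : PySem.Dict String (List String))).values.foldl
      (fun acc g => if 1 < PySem.List.len g then acc ++ [PySem.List.len g] else acc) [])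
    = pvCform (words.map key) := by
  set d := words.foldl (fun d w => d.modify (key w) [] (fun g => g ++ [w]))
      (PySem.Dict.empty : PySem.Dict String (List String)) with hd
  have hnd : d.keys.Nodup := by
    rw [hd]
    exact PySem.Dict.nodup_keys_foldl_modify_key words key ([] : List String)
      (fun _ w => (fun g => g ++ [w])) PySem.Dict.empty (by simp)
  have hv : d.values = d.keys.map (fun k => d.getD k []) :=
    PySem.Dict.values_eq_map_keys d hnd []
  have hshape : (fun (acc : List Int) (g : List String) =>
        if 1 < PySem.List.len g then acc ++ [PySem.List.len g] else acc)
      = (fun acc g => if (decide (1 < PySem.List.len g)) = true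
          then acc ++ [PySem.List.len g] else acc) := by
    funext acc g; simp
  rw [hshape, PySem.List.foldl_append_if, hv, List.nil_append, List.filter_map, List.map_map]
  rw [keysGroup words key]
  have hlen : ∀ c, PySem.List.len (d.getD c []) = ((words.map key).count c : Int) := by
    intro c
    rw [PySem.List.len_eq, lenGroup words key c]
  unfold pvCform
  have hfilt : List.filter ((fun g => decide (1 < PySem.List.len g)) ∘ fun k => d.getD k [])
      (PySem.Set.ofList (List.map key words))
      = List.filter (fun c => decide (1 < (words.map key).count c))
        (PySem.Set.ofList (List.map key words)) := by
    apply List.filter_congr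
    intro c _
    simp only [Function.comp_apply, hlen c, decide_eq_decide]
    exact_mod_cast Iff.rfl
  rw [hfilt]
  apply List.map_congr_left
  intro c _
  simp only [Function.comp_apply, PySem.List.len_eq]
  exact_mod_cast lenGroup words key c

-- ---- B side: the prev/run scan over the sorted keys produces the same closed form ----

lemma foldB (s : List String) : ∀ (sizes : List Int) (p : String) (run : Int),
    pvFin (s.foldl pvStep (sizes, some p, run)) = sizes ++ pvRunsFrom p run s := by
  induction s with
  | nil => intro sizes p run; simp [pvFin, pvRunsFrom, pvEmit]; split_ifs <;> simp
  | cons x s ih =>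
    intro sizes p run
    by_cases hx : x = p
    · subst hx
      simp only [List.foldl_cons, pvStep, pvRunsFrom]
      exact ih sizes x (run + 1)
    · have hne : some x ≠ some p := by simpa using hx
      simp only [List.foldl_cons, pvStep, if_neg hne, pvRunsFrom, if_neg hx]
      rw [ih _ x 1, pvEmit]
      split_ifs <;> simp

lemma ofList_replicate (p : String) (r : Nat) (hr : 0 < r) :
    PySem.Set.ofList (List.replicate r p) = [p] := by
  induction r with
  | zero => omega
  | succ r ih =>
    rw [List.replicate_succ, PySem.Set.ofList_cons]
    rcases Nat.eq_zero_or_pos r with h | h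
    · subst h; simp [PySem.Set.ofList, PySem.Set.discard]
    · rw [ih h]; simp [PySem.Set.discard]

lemma ofList_rep_append (l : List String) (p : String) (r : Nat) (hr : 0 < r) (hp : p ∉ l) :
    PySem.Set.ofList (List.replicate r p ++ l) = p :: PySem.Set.ofList l := by
  rw [PySem.Set.ofList_append, ofList_replicate p r hr, PySem.Set.update_eq_append_filter]
  have h : (PySem.Set.ofList l).filter (fun y => !(PySem.Set.contains [p] y)) = PySem.Set.ofList l := by
    apply List.filter_eq_self.mpr
    intro y hy
    have hyl : y ∈ l := (PySem.Set.mem_ofList l y).mp hy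
    have hyp : y ≠ p := fun h => hp (h ▸ hyl)
    simp [PySem.Set.contains, hyp]
  rw [h]; rfl

lemma cformRep (l : List String) (p : String) (r : Nat) (hr : 0 < r) (hp : p ∉ l) :
    pvCform (List.replicate r p ++ l) = pvEmit (r : Int) ++ pvCform l := by
  have hcp : (List.replicate r p ++ l).count p = r := by
    simp [List.count_append, List.count_replicate_self, List.count_eq_zero.mpr hp]
  have hcc : ∀ c ∈ PySem.Set.ofList l, (List.replicate r p ++ l).count c = l.count c := by
    intro c hc
    have hcl : c ∈ l := (PySem.Set.mem_ofList l c).mp hc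
    have hne : c ≠ p := fun h => hp (h ▸ hcl)
    simp only [List.count_append, List.count_replicate]
    rw [if_neg (by simpa using Ne.symm hne)]
    simp
  unfold pvCform
  rw [ofList_rep_append l p r hr hp]
  rw [List.filter_cons, hcp]
  have hfilt : (PySem.Set.ofList l).filter (fun c => decide (1 < (List.replicate r p ++ l).count c))
      = (PySem.Set.ofList l).filter (fun c => decide (1 < l.count c)) := by
    apply List.filter_congr
    intro c hc
    rw [hcc c hc]
  rw [hfilt]
  have hmap : ((PySem.Set.ofList l).filter (fun c => decide (1 < l.count c))).map
        (fun c => ((List.replicate r p ++ l).count c : Int))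
      = ((PySem.Set.ofList l).filter (fun c => decide (1 < l.count c))).map
        (fun c => (l.count c : Int)) := by
    apply List.map_congr_left
    intro c hc
    rw [hcc c (List.mem_of_mem_filter hc)]
  unfold pvEmit
  by_cases h1 : 1 < r
  · rw [if_pos (by simp [h1]), if_pos (by exact_mod_cast h1)]
    simp only [List.map_cons, hcp, List.cons_append, List.nil_append]
    rw [hmap]
  · rw [if_neg (by simp [h1]), if_neg (by exact_mod_cast h1)]
    simp only [List.nil_append]
    rw [hmap]

lemma runsFromSorted (s : List String) :
    ∀ (p : String) (r : Nat), 0 < r → s.Pairwise (· ≤ ·) → (∀ x ∈ s, p ≤ x) →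
    pvRunsFrom p (r : Int) s = pvCform (List.replicate r p ++ s) := by
  induction s with
  | nil =>
    intro p r hr _ _
    rw [List.append_nil, pvRunsFrom]
    have h := cformRep [] p r hr (by simp)
    rw [List.append_nil] at h
    rw [h]
    simp [pvCform]
  | cons x s ih =>
    intro p r hr hs hp
    by_cases hx : x = p
    · subst hx
      rw [pvRunsFrom, if_pos rfl]
      have hcast : (r : Int) + 1 = ((r + 1 : Nat) : Int) := by push_cast; ring
      rw [hcast, ih x (r + 1) (by omega) hs.of_cons (fun y hy => List.rel_of_pairwise_cons hs hy)]
      congr 1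
      rw [List.replicate_succ']
      simp
    · have hpx : p < x := lt_of_le_of_ne (hp x (List.mem_cons_self)) (fun h => hx h.symm)
      have hpnotin : p ∉ x :: s := by
        intro hmem
        rcases List.mem_cons.mp hmem with h | h
        · exact hx h.symm
        · exact absurd (List.rel_of_pairwise_cons hs h) (not_le.mpr hpx)
      rw [pvRunsFrom, if_neg hx]
      have h1 : (1 : Int) = ((1 : Nat) : Int) := rfl
      rw [h1, ih x 1 (by omega) hs.of_cons (fun y hy => List.rel_of_pairwise_cons hs hy)]
      rw [cformRep (x :: s) p r hr hpnotin]
      congr 1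

lemma B_unsorted (km : List String) :
    pvFin ((PySem.List.sorted km (fun k => k) false).foldl pvStep ([], none, 0))
    = pvCform (PySem.List.sorted km (fun k => k) false) := by
  rcases h : PySem.List.sorted km (fun k => k) false with _ | ⟨x, s⟩
  · simp [pvFin, pvCform, PySem.Set.ofList]
  · have hsp := PySem.List.sorted_pairwise km (fun k => k)
    rw [h] at hsp
    have hstep1 : pvStep ([], none, 0) x = ([], some x, 1) := by
      simp [pvStep]
    rw [List.foldl_cons, hstep1, foldB s [] x 1]
    have h1 : (1 : Int) = ((1 : Nat) : Int) := rfl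
    rw [List.nil_append, h1,
      runsFromSorted s x 1 (by omega) hsp.of_cons (fun y hy => List.rel_of_pairwise_cons hsp hy)]
    congr 1

-- ---- combining: the two closed forms are permutations, so their sorts agree ----

lemma cform_perm (km : List String) :
    (pvCform (PySem.List.sorted km (fun k => k) false)).Perm (pvCform km) := by
  have hperm : (PySem.List.sorted km (fun k => k) false).Perm km :=
    PySem.List.sorted_perm km (fun k => k) false
  have hcount : ∀ c, (PySem.List.sorted km (fun k => k) false).count c = km.count c :=
    fun c => hperm.count_eq c
  have hset : (PySem.Set.ofList (PySem.List.sorted km (fun k => k) false)).Perm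
      (PySem.Set.ofList km) := by
    rw [List.perm_ext_iff_of_nodup (PySem.Set.nodup_ofList _) (PySem.Set.nodup_ofList _)]
    intro a
    rw [PySem.Set.mem_ofList, PySem.Set.mem_ofList]
    exact hperm.mem_iff
  unfold pvCform
  simp only [hcount]
  exact (hset.filter _).map _

lemma B_unsorted_lit (km : List String) :
    (let st := (PySem.List.sorted km (fun k => k) false).foldl
      (fun (st : List Int × Option String × Int) k =>
        if some k = st.2.1 then (st.1, st.2.1, st.2.2 + 1)
        else ((if 1 < st.2.2 then st.1 ++ [st.2.2] else st.1), some k, 1)) ([], none, 0)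
     if 1 < st.2.2 then st.1 ++ [st.2.2] else st.1)
    = pvCform (PySem.List.sorted km (fun k => k) false) := B_unsorted km

lemma line_eq (line : String) (n : Int) :
    check_alliteration_findA line n = check_alliteration_findB line n := by
  have hA := A_unsorted (PySem.Str.split₀ (PySem.Str.strip line))
    (fun w => PySem.Str.lower (PySem.Str.slice w none (some n)))
  beta_reduce at hA
  unfold check_alliteration_findA check_alliteration_findB
  simp only []
  rw [hA, B_unsorted_lit]
  rw [PySem.List.sorted_id_eq_sorted_id_iff_perm]
  exact (cform_perm _).symm

-- ===== VERDICT (by name: the statement is the Claim_ definition above) =====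
theorem check_alliteration_spec : Claim_equal_check_alliteration := by
  intro poem n _
  unfold Spec_check_alliteration check_alliteration check_alliteration_alt
  exact List.map_congr_left (fun line _ => line_eq line n)
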